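-- pv_equiv track=rewrite | github.com/furrtek/PrecIR | tools_python/pr.py | make_ping_frame
-- ===== SOURCE A (Python) =====
-- def crc16(data):
--     result = 0x8408
--     poly = 0x8408
--
--     for by in data:
--         result ^= by
--         for bi in range(0, 8):
--             if (result & 1):
--                 result >>= 1
--                 result ^= poly
--             else:
--                 result >>= 1
--
--     return result
--
-- def terminate_frame(frame, repeats):
--     crc = crc16(frame)
--     frame.append(crc & 255)
--     frame.append((crc // 256) & 255)
--     frame.append(repeats & 255)             # This is used by the transmitter, it's not part of the transmitted data
--     frame.append((repeats // 256) & 255)    # This is used by the transmitter, it's not part of the transmitted data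
--
-- def make_raw_frame(protocol, PLID, cmd):
--     frame = [protocol, PLID[3], PLID[2], PLID[1], PLID[0], cmd]
--     return frame
--
-- def make_ping_frame(PLID, repeats):
--     frame = make_raw_frame(0x85, PLID, 0x17)
--     frame.append(0x01)
--     frame.append(0x00)
--     frame.append(0x00)
--     frame.append(0x00)
--     for b in range(0, 22):
--         frame.append(0x01)
--     terminate_frame(frame, repeats)
--     return frame
-- ===== SOURCE B (Python) =====
-- def _crc16_reduce(r):
--     # one byte's worth of the reflected CRC reduction (8 right-shift steps)
--     for _ in range(8):
--         r = (r >> 1) ^ 0x8408 if r & 1 else r >> 1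
--     return r
--
-- _CRC16_TABLE = [_crc16_reduce(b) for b in range(256)]
--
-- def make_ping_frame(PLID, repeats):
--     frame = [0x85, PLID[3], PLID[2], PLID[1], PLID[0], 0x17,
--              0x01, 0x00, 0x00, 0x00] + [0x01] * 22
--     crc = 0x8408
--     for by in frame:
--         x = crc ^ by
--         crc = (x >> 8) ^ _CRC16_TABLE[x & 0xFF]
--     frame += [crc & 0xFF, (crc >> 8) & 0xFF, repeats & 0xFF, (repeats >> 8) & 0xFF]
--     return frame
-- ===== Notes on version B (the rewrite author's own statement) =====
-- stated objective: idiomatic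
-- what changed: The per-bit crc16 loop (8 shift/xor steps for every byte) is replaced by the standard table-driven CRC: a 256-entry table for poly 0x8408 is built once at module load and each byte is then processed with a single shift and table lookup; the frame is built as one literal list instead of repeated appends.
import Mathlib
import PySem

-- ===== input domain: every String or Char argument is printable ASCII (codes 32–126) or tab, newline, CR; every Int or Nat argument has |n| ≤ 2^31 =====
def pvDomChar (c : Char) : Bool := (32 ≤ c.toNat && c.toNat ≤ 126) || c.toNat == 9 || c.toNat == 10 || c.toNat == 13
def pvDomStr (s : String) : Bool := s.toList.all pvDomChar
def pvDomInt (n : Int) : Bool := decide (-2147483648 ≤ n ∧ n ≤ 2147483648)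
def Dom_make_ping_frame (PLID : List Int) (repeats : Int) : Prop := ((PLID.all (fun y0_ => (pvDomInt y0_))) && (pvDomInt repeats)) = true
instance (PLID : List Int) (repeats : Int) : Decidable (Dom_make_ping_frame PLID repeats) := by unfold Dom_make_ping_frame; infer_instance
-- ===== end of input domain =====

-- B replaces A's per-bit crc16 loop with a table-driven CRC (one lookup per byte); return values proved equal.
-- A mutates its local frame list only; no argument is mutated, so return-value equivalence is the whole behaviour.

-- ===== PORT A =====
-- crc16: result starts at 0x8408 = 33800; per byte, xor then 8 shift/xor-poly steps.
def crc16 (data : List Int) : Int :=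
  data.foldl (fun result by_ =>
    (PySem.List.pyRange 0 8).foldl (fun r _ =>
      if PySem.Int.band r 1 ≠ 0 then PySem.Int.bxor (r >>> (1:Nat)) 33800 else r >>> (1:Nat))
      (PySem.Int.bxor result by_)) 33800

-- terminate_frame mutates `frame` in Python; ported as returning the extended list.
def terminate_frame (frame : List Int) (repeats : Int) : List Int :=
  let crc := crc16 frame
  frame ++ [PySem.Int.band crc 255, PySem.Int.band (PySem.Int.floordiv crc 256) 255,
            PySem.Int.band repeats 255, PySem.Int.band (PySem.Int.floordiv repeats 256) 255]

-- PLID[3] … PLID[0] raise IndexError when PLID is shorter than 4; Pre_ excludes that, so the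
-- pyGetD default 0 is never reached on admitted inputs.
def make_raw_frame (protocol : Int) (PLID : List Int) (cmd : Int) : List Int :=
  [protocol, PySem.List.pyGetD PLID 3 0, PySem.List.pyGetD PLID 2 0,
   PySem.List.pyGetD PLID 1 0, PySem.List.pyGetD PLID 0 0, cmd]

def make_ping_frame (PLID : List Int) (repeats : Int) : List Int :=
  let frame := make_raw_frame 133 PLID 23
  let frame := frame ++ [1] ++ [0] ++ [0] ++ [0]
  let frame := (PySem.List.pyRange 0 22).foldl (fun f _ => f ++ [1]) frame
  terminate_frame frame repeats

-- ===== PORT B =====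
-- one byte's worth of the reflected CRC reduction (8 right-shift steps)
def crc16_reduce (r : Int) : Int :=
  (PySem.List.pyRange 0 8).foldl (fun r _ =>
    if PySem.Int.band r 1 ≠ 0 then PySem.Int.bxor (r >>> (1:Nat)) 33800 else r >>> (1:Nat)) r

-- _CRC16_TABLE = [_crc16_reduce(b) for b in range(256)]
def crc16_table : List Int := (PySem.List.pyRange 0 256).map crc16_reduce

-- table[x & 0xFF]: the index is in [0,256) (band with 255), so pyGetD's default is never reached.
def make_ping_frame_alt (PLID : List Int) (repeats : Int) : List Int :=
  let frame := [133, PySem.List.pyGetD PLID 3 0, PySem.List.pyGetD PLID 2 0,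
                PySem.List.pyGetD PLID 1 0, PySem.List.pyGetD PLID 0 0, 23,
                1, 0, 0, 0] ++ List.replicate 22 1
  let crc := frame.foldl (fun crc by_ =>
    let x := PySem.Int.bxor crc by_
    PySem.Int.bxor (x >>> (8:Nat)) (PySem.List.pyGetD crc16_table (PySem.Int.band x 255) 0)) 33800
  frame ++ [PySem.Int.band crc 255, PySem.Int.band (crc >>> (8:Nat)) 255,
            PySem.Int.band repeats 255, PySem.Int.band (repeats >>> (8:Nat)) 255]

-- ===== PRECONDITION & SPEC =====
-- Pre_ excludes PLID with fewer than 4 elements: there A raises IndexError (PLID[3]); B raises too.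
def Pre_make_ping_frame (PLID : List Int) (repeats : Int) : Prop := 4 ≤ PLID.length
instance (PLID : List Int) (repeats : Int) : Decidable (Pre_make_ping_frame PLID repeats) := by unfold Pre_make_ping_frame; infer_instance
def pvWitness_make_ping_frame : List Int × Int := ([18, 52, 86, 120], 3)

def Spec_make_ping_frame (PLID : List Int) (repeats : Int) (out : List Int) : Prop := out = make_ping_frame_alt PLID repeats
instance (PLID : List Int) (repeats : Int) (out : List Int) : Decidable (Spec_make_ping_frame PLID repeats out) := by unfold Spec_make_ping_frame; infer_instance

-- ===== CLAIM (what is proved, stated in full; the proofs are below) =====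
def Claim_equal_make_ping_frame : Prop := ∀ (PLID : List Int) (repeats : Int), Dom_make_ping_frame PLID repeats → Pre_make_ping_frame PLID repeats → Spec_make_ping_frame PLID repeats (make_ping_frame PLID repeats)

-- ===== LEMMAS AND PROOFS =====

-- one CRC step, as both ports' inner-loop body
def crcStep (r : Int) : Int :=
  if PySem.Int.band r 1 ≠ 0 then PySem.Int.bxor (r >>> (1:Nat)) 33800 else r >>> (1:Nat)

def crcStepN : Nat → Int → Int
  | 0, r => r
  | n + 1, r => crcStepN n (crcStep r)

lemma int_testBit_ext {a b : Int} (h : ∀ i, a.testBit i = b.testBit i) : a = b := by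
  rcases a with m | m <;> rcases b with n | n
  · exact congrArg Int.ofNat (Nat.eq_of_testBit_eq fun i => h i)
  · exfalso
    have h1 := h (m + n)
    have hm : Nat.testBit m (m + n) = false :=
      Nat.testBit_lt_two_pow (lt_of_lt_of_le Nat.lt_two_pow_self (Nat.pow_le_pow_right (by norm_num) (Nat.le_add_right m n)))
    have hn : Nat.testBit n (m + n) = false :=
      Nat.testBit_lt_two_pow (lt_of_lt_of_le Nat.lt_two_pow_self (Nat.pow_le_pow_right (by norm_num) (Nat.le_add_left n m)))
    simp [Int.testBit, hm, hn] at h1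
  · exfalso
    have h1 := h (m + n)
    have hm : Nat.testBit m (m + n) = false :=
      Nat.testBit_lt_two_pow (lt_of_lt_of_le Nat.lt_two_pow_self (Nat.pow_le_pow_right (by norm_num) (Nat.le_add_right m n)))
    have hn : Nat.testBit n (m + n) = false :=
      Nat.testBit_lt_two_pow (lt_of_lt_of_le Nat.lt_two_pow_self (Nat.pow_le_pow_right (by norm_num) (Nat.le_add_left n m)))
    simp [Int.testBit, hm, hn] at h1
  · have h2 : m = n := Nat.eq_of_testBit_eq fun i => by
      have := h i; simpa [Int.testBit] using this
    simp [h2]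

lemma bxor_oo (m n : Nat) : PySem.Int.bxor (m:Int) (n:Int) = ((m ^^^ n : Nat) : Int) := by
  simp [PySem.Int.bxor]

lemma bxor_on (m n : Nat) : PySem.Int.bxor (m:Int) (Int.negSucc n) = Int.negSucc (m ^^^ n) := by
  have h1 : ¬ (0:Int) ≤ Int.negSucc n := by rw [Int.negSucc_eq]; omega
  have h2 : (0:Int) ≤ (m:Int) := by positivity
  have h3 : (-(Int.negSucc n) - 1) = (n:Int) := by rw [Int.negSucc_eq]; ring
  simp only [PySem.Int.bxor, if_pos h2, if_neg h1, h3, Int.toNat_natCast]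
  rw [Int.negSucc_eq]; ring

lemma bxor_no (m n : Nat) : PySem.Int.bxor (Int.negSucc m) (n:Int) = Int.negSucc (m ^^^ n) := by
  have h1 : ¬ (0:Int) ≤ Int.negSucc m := by rw [Int.negSucc_eq]; omega
  have h2 : (0:Int) ≤ (n:Int) := by positivity
  have h3 : (-(Int.negSucc m) - 1) = (m:Int) := by rw [Int.negSucc_eq]; ring
  simp only [PySem.Int.bxor, if_pos h2, if_neg h1, h3, Int.toNat_natCast]
  rw [Int.negSucc_eq]; ring

lemma bxor_nn (m n : Nat) : PySem.Int.bxor (Int.negSucc m) (Int.negSucc n) = ((m ^^^ n : Nat) : Int) := by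
  have h1 : ¬ (0:Int) ≤ Int.negSucc m := by rw [Int.negSucc_eq]; omega
  have h2 : ¬ (0:Int) ≤ Int.negSucc n := by rw [Int.negSucc_eq]; omega
  have h3 : (-(Int.negSucc m) - 1) = (m:Int) := by rw [Int.negSucc_eq]; ring
  have h4 : (-(Int.negSucc n) - 1) = (n:Int) := by rw [Int.negSucc_eq]; ring
  simp only [PySem.Int.bxor, if_neg h2, if_neg h1, h3, h4, Int.toNat_natCast]

lemma tb_bxor (a b : Int) (i : Nat) :
    (PySem.Int.bxor a b).testBit i = xor (a.testBit i) (b.testBit i) := by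
  rcases a with m | m <;> rcases b with n | n
  · rw [show ((Int.ofNat m) : Int) = (m:Int) from rfl, show ((Int.ofNat n) : Int) = (n:Int) from rfl, bxor_oo]
    simp [Int.testBit, Nat.testBit_xor]
  · rw [show ((Int.ofNat m) : Int) = (m:Int) from rfl, bxor_on]
    simp [Int.testBit, Nat.testBit_xor]
  · rw [show ((Int.ofNat n) : Int) = (n:Int) from rfl, bxor_no]
    simp [Int.testBit, Nat.testBit_xor]
  · rw [bxor_nn]
    simp [Int.testBit, Nat.testBit_xor]

lemma tb_shiftRight (a : Int) (n i : Nat) : (a >>> n).testBit i = a.testBit (n + i) := by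
  rcases a with m | m
  · show (Int.ofNat (m >>> n)).testBit i = _
    simp [Int.testBit, Nat.testBit_shiftRight]
  · show (Int.negSucc (m >>> n)).testBit i = _
    simp [Int.testBit, Nat.testBit_shiftRight]

set_option maxRecDepth 4000 in
lemma mask_fin : ∀ k : Nat, k < 256 → ∀ i : Nat, i < 8 → (255 - k).testBit i = !(k.testBit i) := by decide

lemma band255_negSucc (m : Nat) :
    PySem.Int.band (Int.negSucc m) 255 = ((255 - m % 256 : Nat) : Int) := by
  have h1 : ¬ (0:Int) ≤ Int.negSucc m := by rw [Int.negSucc_eq]; omega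
  have h2 : (0:Int) ≤ 255 := by norm_num
  have h3 : (-(Int.negSucc m) - 1) = (m:Int) := by rw [Int.negSucc_eq]; ring
  have h5 : (255:Int).toNat = 255 := rfl
  simp only [PySem.Int.band, if_neg h1, if_pos h2, h3, Int.toNat_natCast, h5]
  have hm : m &&& 255 = m % 256 := by
    have := Nat.and_two_pow_sub_one_eq_mod m 8; norm_num at this; exact this
  rw [Nat.and_comm, hm]

lemma tb_band255 (a : Int) (i : Nat) :
    (PySem.Int.band a 255).testBit i = (a.testBit i && decide (i < 8)) := by
  rcases a with m | m
  · rw [show ((Int.ofNat m) : Int) = (m:Int) from rfl,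
        show ((255:Int)) = ((255:Nat):Int) by norm_num, PySem.Int.band_natCast]
    by_cases hi : i < 8
    · simp [Int.testBit, Nat.testBit_and, hi, show (255:Nat).testBit i = true by
        have := Nat.testBit_two_pow_sub_one 8 i; simpa [hi] using this]
    · simp [Int.testBit, Nat.testBit_and, hi, show (255:Nat).testBit i = false by
        have := Nat.testBit_two_pow_sub_one 8 i; simpa [hi] using this]
  · rw [band255_negSucc]
    by_cases hi : i < 8
    · have h6 : ((255 - m % 256 : Nat) : Int).testBit i = (255 - m % 256).testBit i := rfl
      rw [h6, mask_fin (m % 256) (Nat.mod_lt _ (by norm_num)) i hi]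
      have h7 : (m % 256).testBit i = m.testBit i := by
        have := Nat.testBit_mod_two_pow m 8 i; simpa [hi] using this
      simp [Int.testBit, h7, hi]
    · have hlt : 255 - m % 256 < 2 ^ i := by
        have : (256:Nat) ≤ 2 ^ i := by
          calc (256:Nat) = 2^8 := by norm_num
          _ ≤ 2^i := Nat.pow_le_pow_right (by norm_num) (by omega)
        omega
      have h6 : ((255 - m % 256 : Nat) : Int).testBit i = (255 - m % 256).testBit i := rfl
      rw [h6, Nat.testBit_lt_two_pow hlt]
      simp [hi]

lemma band255_bounds (a : Int) : ∃ k : Nat, PySem.Int.band a 255 = (k : Int) ∧ k < 256 := by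
  rcases a with m | m
  · refine ⟨m &&& 255, ?_, ?_⟩
    · rw [show ((Int.ofNat m) : Int) = (m:Int) from rfl,
          show ((255:Int)) = ((255:Nat):Int) by norm_num, PySem.Int.band_natCast]
    · have := Nat.and_two_pow_sub_one_eq_mod m 8
      norm_num at this; omega
  · exact ⟨255 - m % 256, band255_negSucc m, by omega⟩

lemma parity_band (a : Int) : (PySem.Int.band a 1 ≠ 0) ↔ a.testBit 0 = true := by
  rw [PySem.Int.band_one, PySem.Int.mod_eq_emod_of_pos (by norm_num : (0:Int) < 2)]
  rcases a with m | m
  · have h : (Int.ofNat m) % 2 = ((m % 2 : Nat) : Int) := by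
      show ((m:Int)) % 2 = _ ; push_cast; omega
    rw [h]
    simp [Int.testBit, Nat.testBit_zero]
    omega
  · have hm : Int.negSucc m % 2 = ((1 - m % 2 : Nat) : Int) := by
      rw [Int.negSucc_eq]
      have h8 : (((1 - m % 2 : Nat)) : Int) = 1 - ((m:Int)) % 2 := by
        have := Nat.mod_lt m (show 0 < 2 by norm_num)
        omega
      rw [h8]; omega
    rw [hm]
    simp [Int.testBit, Nat.testBit_zero]
    omega

lemma floordiv_256 (a : Int) : PySem.Int.floordiv a 256 = a >>> (8:Nat) := by
  rw [PySem.Int.floordiv_eq_ediv_of_pos (by norm_num : (0:Int) < 256), Int.shiftRight_eq_div_pow]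
  norm_num

lemma bxor_shift (a b : Int) (n : Nat) :
    PySem.Int.bxor a b >>> n = PySem.Int.bxor (a >>> n) (b >>> n) := by
  apply int_testBit_ext; intro i
  simp [tb_shiftRight, tb_bxor]

lemma crcStep_bxor (a b : Int) :
    crcStep (PySem.Int.bxor a b) = PySem.Int.bxor (crcStep a) (crcStep b) := by
  unfold crcStep
  have hpar : (PySem.Int.bxor a b).testBit 0 = xor (a.testBit 0) (b.testBit 0) := tb_bxor a b 0
  by_cases ha : a.testBit 0 = true <;> by_cases hb : b.testBit 0 = true
  · rw [if_neg, if_pos ((parity_band a).2 ha), if_pos ((parity_band b).2 hb)]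
    · rw [bxor_shift]
      apply int_testBit_ext; intro i
      simp only [tb_bxor]
      cases (a >>> (1:Nat)).testBit i <;> cases (b >>> (1:Nat)).testBit i <;>
        cases Int.testBit 33800 i <;> rfl
    · intro h
      have := (parity_band _).1 h
      rw [hpar, ha, hb] at this; simp at this
  · rw [if_pos, if_pos ((parity_band a).2 ha), if_neg (fun h => hb ((parity_band b).1 h))]
    · rw [bxor_shift]
      apply int_testBit_ext; intro i
      simp only [tb_bxor]
      cases (a >>> (1:Nat)).testBit i <;> cases (b >>> (1:Nat)).testBit i <;>
        cases Int.testBit 33800 i <;> rfl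
    · apply (parity_band _).2
      rw [hpar, ha]
      simp [hb]
  · rw [if_pos, if_neg (fun h => ha ((parity_band a).1 h)), if_pos ((parity_band b).2 hb)]
    · rw [bxor_shift]
      apply int_testBit_ext; intro i
      simp only [tb_bxor]
      cases (a >>> (1:Nat)).testBit i <;> cases (b >>> (1:Nat)).testBit i <;>
        cases Int.testBit 33800 i <;> rfl
    · apply (parity_band _).2
      rw [hpar, hb]
      simp [ha]
  · rw [if_neg, if_neg (fun h => ha ((parity_band a).1 h)), if_neg (fun h => hb ((parity_band b).1 h))]
    · exact bxor_shift a b 1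
    · intro h
      have hA : a.testBit 0 = false := by revert ha; cases a.testBit 0 <;> simp
      have hB : b.testBit 0 = false := by revert hb; cases b.testBit 0 <;> simp
      have := (parity_band _).1 h
      rw [hpar, hA, hB] at this
      exact Bool.noConfusion this

lemma crcStepN_bxor (n : Nat) : ∀ a b : Int,
    crcStepN n (PySem.Int.bxor a b) = PySem.Int.bxor (crcStepN n a) (crcStepN n b) := by
  induction n with
  | zero => intro a b; rfl
  | succ n ih => intro a b; simp [crcStepN, crcStep_bxor, ih]

lemma crcStepN_low (n : Nat) : ∀ a : Int, (∀ i, i < n → a.testBit i = false) →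
    crcStepN n a = a >>> n := by
  induction n with
  | zero =>
    intro a _
    show a = a >>> (0:Nat)
    apply int_testBit_ext; intro i
    rw [tb_shiftRight]; congr 1; omega
  | succ n ih =>
    intro a h
    have hstep : crcStep a = a >>> (1:Nat) := by
      unfold crcStep
      rw [if_neg]
      intro hc
      have := (parity_band a).1 hc
      rw [h 0 (by omega)] at this; exact Bool.noConfusion this
    show crcStepN n (crcStep a) = a >>> (n+1)
    rw [hstep, ih _ (fun i hi => by rw [tb_shiftRight]; exact h (1+i) (by omega))]
    apply int_testBit_ext; intro i
    rw [tb_shiftRight, tb_shiftRight, tb_shiftRight]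
    congr 1; omega

-- the master per-byte identity: 8 bit-steps = shift by 8 + reduction of the low byte
lemma crcStepN_split (x : Int) :
    crcStepN 8 x = PySem.Int.bxor (x >>> (8:Nat)) (crcStepN 8 (PySem.Int.band x 255)) := by
  have hx : x = PySem.Int.bxor (PySem.Int.bxor x (PySem.Int.band x 255)) (PySem.Int.band x 255) := by
    apply int_testBit_ext; intro i
    simp only [tb_bxor, tb_band255]
    cases x.testBit i <;> cases (decide (i < 8)) <;> rfl
  have hlow : ∀ i, i < 8 → (PySem.Int.bxor x (PySem.Int.band x 255)).testBit i = false := by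
    intro i hi
    simp only [tb_bxor, tb_band255, hi, decide_true, Bool.and_true, Bool.xor_self]
  have hhi : crcStepN 8 (PySem.Int.bxor x (PySem.Int.band x 255)) = x >>> (8:Nat) := by
    rw [crcStepN_low 8 _ hlow]
    apply int_testBit_ext; intro i
    rw [tb_shiftRight, tb_shiftRight, tb_bxor, tb_band255]
    simp [show ¬ (8 + i < 8) by omega]
  conv_lhs => rw [hx]
  rw [crcStepN_bxor, hhi]

lemma reduce_eq_stepN (r : Int) : crc16_reduce r = crcStepN 8 r := by
  rw [crc16_reduce, show PySem.List.pyRange 0 8 = [0,1,2,3,4,5,6,7] from by decide]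
  rfl

lemma table_lookup (x : Int) :
    PySem.List.pyGetD crc16_table (PySem.Int.band x 255) 0 = crcStepN 8 (PySem.Int.band x 255) := by
  obtain ⟨k, hk, hlt⟩ := band255_bounds x
  rw [hk]
  have h256 : ((256:Int)) = ((256:Nat):Int) := by norm_num
  rw [crc16_table, h256, PySem.List.pyGetD_map_pyRange crc16_reduce 256 k 0 hlt]
  exact reduce_eq_stepN _

lemma crc16_eq (data : List Int) :
    crc16 data = data.foldl (fun crc by_ =>
      let x := PySem.Int.bxor crc by_
      PySem.Int.bxor (x >>> (8:Nat)) (PySem.List.pyGetD crc16_table (PySem.Int.band x 255) 0)) 33800 := by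
  rw [crc16]
  apply PySem.List.foldl_congr_mem
  intro r v _
  show crcStepN 8 (PySem.Int.bxor r v) = _
  dsimp only
  rw [table_lookup, ← crcStepN_split]

-- ===== VERDICT (by name: the statement is the Claim_ definition above) =====
theorem make_ping_frame_spec : Claim_equal_make_ping_frame := by
  intro PLID repeats _ _
  show make_ping_frame PLID repeats = make_ping_frame_alt PLID repeats
  rw [make_ping_frame, make_ping_frame_alt, make_raw_frame, terminate_frame]
  have hframe : (PySem.List.pyRange 0 22).foldl (fun f _ => f ++ [1])
      ([133, PySem.List.pyGetD PLID 3 0, PySem.List.pyGetD PLID 2 0,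
        PySem.List.pyGetD PLID 1 0, PySem.List.pyGetD PLID 0 0, 23] ++ [1] ++ [0] ++ [0] ++ [0])
      = [133, PySem.List.pyGetD PLID 3 0, PySem.List.pyGetD PLID 2 0,
         PySem.List.pyGetD PLID 1 0, PySem.List.pyGetD PLID 0 0, 23,
         1, 0, 0, 0] ++ List.replicate 22 1 := by
    rw [show PySem.List.pyRange 0 22 = [0,1,2,3,4,5,6,7,8,9,10,11,12,13,14,15,16,17,18,19,20,21] from by decide]
    simp [List.foldl, List.replicate]
  rw [hframe, crc16_eq, floordiv_256, floordiv_256]
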